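-- pv_equiv track=rewrite | github.com/guglxni/anumate | services/captokens/src/anumate_captokens_service/capability_checker.py | _capability_matches
-- ===== SOURCE A (Python) =====
-- def _capability_matches(provided: str, required: str) -> bool:
--     """
--     Check if a provided capability matches a required capability.
--
--     Supports hierarchical matching (e.g., 'admin' matches 'admin.*')
--     """
--     # Exact match
--     if provided == required:
--         return True
--
--     # Hierarchical matching (dot notation)
--     if "." in required:
--         # 'admin.read' matches 'admin.*' or 'admin'
--         required_parts = required.split(".")
--         provided_parts = provided.split(".")
--
--         if len(provided_parts) >= len(required_parts):
--             for i, req_part in enumerate(required_parts):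
--                 if req_part == "*":
--                     return True
--                 if i >= len(provided_parts) or provided_parts[i] != req_part:
--                     return False
--             return True
--
--     # Admin-level capabilities
--     if provided == "admin" and not required.startswith("admin."):
--         return True
--
--     return False
-- ===== SOURCE B (Python) =====
-- def _capability_matches(provided: str, required: str) -> bool:
--     """Check if a provided capability matches a required capability (hierarchical)."""
--     if provided == required:
--         return True
--     if "." in required and provided.count(".") >= required.count("."):
--         # '*' components are located by pure substring search: no splitting.
--         if required.startswith("*."):
--             return True
--         i = required.find(".*.")
--         if i != -1:
--             return provided.startswith(required[:i + 1])
--         if required.endswith(".*"):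
--             return provided.startswith(required[:-1])
--         return provided.startswith(required + ".")
--     return provided == "admin" and not required.startswith("admin.")
-- ===== Notes on version B (the rewrite author's own statement) =====
-- stated objective: alternative
-- what changed: B never splits the strings: it locates the wildcard component by substring search (startswith '*.', find '.*.', endswith '.*') and decides the whole match with a single string prefix test, where A builds both part lists and scans them element by element.
import Mathlib
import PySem

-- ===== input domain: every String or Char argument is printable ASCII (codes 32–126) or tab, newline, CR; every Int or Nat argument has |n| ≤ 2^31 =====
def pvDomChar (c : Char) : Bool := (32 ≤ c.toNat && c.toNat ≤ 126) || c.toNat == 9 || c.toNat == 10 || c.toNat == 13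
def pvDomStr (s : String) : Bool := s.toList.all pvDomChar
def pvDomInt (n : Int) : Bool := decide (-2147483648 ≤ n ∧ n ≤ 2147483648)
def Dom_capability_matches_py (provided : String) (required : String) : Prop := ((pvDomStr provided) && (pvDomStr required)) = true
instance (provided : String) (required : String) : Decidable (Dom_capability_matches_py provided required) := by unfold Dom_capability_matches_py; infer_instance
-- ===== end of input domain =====

-- B decides the hierarchical match with no splitting at all: the wildcard component is
-- located by substring search (find ".*.", startswith "*.", endswith ".*") and the
-- verdict is a single prefix test on the raw strings (objective: alternative).

-- ===== PORT A =====
-- the 'for i, req_part in enumerate(required_parts)' loop with its early returns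
def capMatchLoopA (pp : List String) : List (Int × String) → Bool
  | [] => true
  | (i, req) :: rest =>
    if req = "*" then true
    else if i ≥ (pp.length : Int) ∨ PySem.List.pyGet? pp i ≠ some req then false
    else capMatchLoopA pp rest

def capability_matches_py (provided : String) (required : String) : Bool :=
  if provided = required then true
  else
    -- 'if "." in required: … if len(pp) >= len(rp): <loop>'; none = fell through
    let hier : Option Bool :=
      if PySem.Str.isIn "." required then
        let rp := (PySem.Str.split? required ".").getD []
        let pp := (PySem.Str.split? provided ".").getD []
        if pp.length ≥ rp.length then
          some (capMatchLoopA pp (PySem.List.enumerate rp))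
        else none
      else none
    match hier with
    | some b => b
    | none =>
      if provided = "admin" ∧ ¬ (PySem.Str.startswith required "admin.") then true
      else false

-- ===== PORT B =====
def capability_matches_py_alt (provided : String) (required : String) : Bool :=
  if provided = required then true
  else
    let p := provided.toList
    let r := required.toList
    if PySem.Chars.isIn ['.'] r && decide (PySem.Chars.count p ['.'] ≥ PySem.Chars.count r ['.']) then
      if PySem.Chars.startswith r ['*', '.'] then true
      else
        let i := PySem.Chars.find r ['.', '*', '.']
        if i ≠ -1 then
          -- provided.startswith(required[:i + 1])
          PySem.Chars.startswith p (PySem.List.slice r none (some (i + 1)))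
        else if PySem.Chars.endswith r ['.', '*'] then
          -- provided.startswith(required[:-1])
          PySem.Chars.startswith p (PySem.List.slice r none (some (-1)))
        else
          -- provided.startswith(required + ".")
          PySem.Chars.startswith p (r ++ ['.'])
    else
      decide (provided = "admin") && !(PySem.Chars.startswith r ['a','d','m','i','n','.'])

-- ===== PRECONDITION & SPEC =====
def Spec_capability_matches_py (provided : String) (required : String) (out : Bool) : Prop := out = capability_matches_py_alt provided required
instance (provided : String) (required : String) (out : Bool) : Decidable (Spec_capability_matches_py provided required out) := by unfold Spec_capability_matches_py; infer_instance

-- ===== CLAIM (what is proved, stated in full; the proofs are below) =====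
def Claim_equal_capability_matches_py : Prop := ∀ (provided : String) (required : String), Dom_capability_matches_py provided required → Spec_capability_matches_py provided required (capability_matches_py provided required)

-- ===== LEMMAS AND PROOFS =====

-- clean structural form of splitting on '.' (proof-only helper)
def mySplit : List Char → List (List Char)
  | [] => [[]]
  | c :: cs =>
    if c = '.' then [] :: mySplit cs
    else
      match mySplit cs with
      | [] => [[c]]
      | h :: t => (c :: h) :: t

-- char-level value A computes in the hierarchical branch
def capAv (pp rp : List (List Char)) : Bool :=
  match PySem.List.index? rp ['*'] with
  | some j => decide (pp.take j = rp.take j)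
  | none => decide (pp.take rp.length = rp)

-- char-level value B computes in the hierarchical branch
def capBv (p r : List Char) : Bool :=
  if PySem.Chars.startswith r ['*', '.'] then true
  else if PySem.Chars.find r ['.', '*', '.'] ≠ -1 then
    PySem.Chars.startswith p (PySem.List.slice r none (some (PySem.Chars.find r ['.', '*', '.'] + 1)))
  else if PySem.Chars.endswith r ['.', '*'] then
    PySem.Chars.startswith p (PySem.List.slice r none (some (-1)))
  else PySem.Chars.startswith p (r ++ ['.'])

lemma mySplit_ne_nil (cs : List Char) : mySplit cs ≠ [] := by
  cases cs with
  | nil => simp [mySplit]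
  | cons c cs =>
    simp only [mySplit]
    split
    · simp
    · cases mySplit cs <;> simp

-- prepend to the head component
def consH (x : List Char) : List (List Char) → List (List Char)
  | [] => [x]
  | h :: t => (x ++ h) :: t

lemma splitOn_go_eq (fuel : Nat) : ∀ (l cur : List Char) (acc : List (List Char)),
    l.length < fuel →
    PySem.Chars.splitOn.go ['.'] fuel l cur acc = acc.reverse ++ consH cur.reverse (mySplit l) := by
  induction fuel with
  | zero => intro l cur acc h; omega
  | succ fuel ih =>
    intro l cur acc h
    cases l with
    | nil =>
      rw [PySem.Chars.splitOn.go.eq_def]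
      simp [mySplit, consH]
    | cons c rest =>
      rw [PySem.Chars.splitOn.go.eq_def]
      obtain ⟨h0, t0, ht⟩ := List.exists_cons_of_ne_nil (mySplit_ne_nil rest)
      by_cases hc : c = '.'
      · subst hc
        have hpre : (['.'] : List Char).isPrefixOf ('.' :: rest) = true := by
          simp [List.isPrefixOf]
        simp only [hpre, if_true, List.length_singleton]
        rw [ih _ _ _ (by simpa using Nat.lt_of_succ_lt_succ h)]
        simp [mySplit, consH, ht]
      · have hpre : (['.'] : List Char).isPrefixOf (c :: rest) = false := by
          simp only [List.isPrefixOf, List.isPrefixOf_nil_left, Bool.and_true, beq_eq_false_iff_ne, ne_eq]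
          exact fun hh => hc hh.symm
        simp only [hpre, Bool.false_eq_true, if_false]
        rw [ih _ _ _ (by simpa using Nat.lt_of_succ_lt_succ h)]
        simp [mySplit, consH, ht, hc]

lemma splitOn_eq_mySplit (cs : List Char) :
    PySem.Chars.splitOn cs ['.'] = mySplit cs := by
  unfold PySem.Chars.splitOn
  rw [splitOn_go_eq (cs.length + 1) cs [] [] (by omega)]
  obtain ⟨h0, t0, ht⟩ := List.exists_cons_of_ne_nil (mySplit_ne_nil cs)
  simp [consH, ht]

lemma count_go_eq (fuel : Nat) : ∀ (l : List Char) (acc : Nat), l.length ≤ fuel →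
    PySem.Chars.count.go ['.'] fuel l acc = acc + l.count '.' := by
  induction fuel with
  | zero =>
    intro l acc h
    have hl : l = [] := by cases l <;> simp_all
    subst hl
    rw [PySem.Chars.count.go.eq_def]
    simp
  | succ fuel ih =>
    intro l acc h
    cases l with
    | nil =>
      rw [PySem.Chars.count.go.eq_def]
      simp
    | cons c rest =>
      rw [PySem.Chars.count.go.eq_def]
      by_cases hc : c = '.'
      · subst hc
        have hpre : (['.'] : List Char).isPrefixOf ('.' :: rest) = true := by
          simp [List.isPrefixOf]
        simp only [hpre, if_true, List.length_singleton]
        rw [ih _ _ (by simpa using Nat.le_of_succ_le_succ h)]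
        simp [List.count_cons]
        omega
      · have hpre : (['.'] : List Char).isPrefixOf (c :: rest) = false := by
          simp only [List.isPrefixOf, List.isPrefixOf_nil_left, Bool.and_true, beq_eq_false_iff_ne, ne_eq]
          exact fun hh => hc hh.symm
        simp only [hpre, Bool.false_eq_true, if_false]
        rw [ih _ _ (by simpa using Nat.le_of_succ_le_succ h)]
        simp [List.count_cons, hc]

lemma count_dot_eq (cs : List Char) : PySem.Chars.count cs ['.'] = cs.count '.' := by
  unfold PySem.Chars.count
  simp only [List.isEmpty_cons, Bool.false_eq_true, if_false]
  rw [count_go_eq cs.length cs 0 (le_refl _)]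
  omega

lemma length_mySplit (cs : List Char) : (mySplit cs).length = cs.count '.' + 1 := by
  induction cs with
  | nil => simp [mySplit]
  | cons c cs ih =>
    by_cases hc : c = '.'
    · subst hc
      simp [mySplit, List.count_cons, ih]
    · obtain ⟨h0, t0, ht⟩ := List.exists_cons_of_ne_nil (mySplit_ne_nil cs)
      simp only [mySplit, hc, if_false, ht]
      rw [ht] at ih
      simp only [List.length_cons] at ih ⊢
      simp [List.count_cons, hc]
      omega

lemma mySplit_of_not_mem {cs : List Char} (h : '.' ∉ cs) : mySplit cs = [cs] := by
  induction cs with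
  | nil => simp [mySplit]
  | cons c cs ih =>
    have hc : c ≠ '.' := fun hh => h (by simp [hh])
    have hcs : mySplit cs = [cs] := ih (fun hh => h (List.mem_cons_of_mem _ hh))
    simp [mySplit, hc, hcs]

lemma mySplit_append (u : List Char) (r' : List Char) (hu : '.' ∉ u) :
    mySplit (u ++ '.' :: r') = u :: mySplit r' := by
  induction u with
  | nil => simp [mySplit]
  | cons a u' ih =>
    have ha : a ≠ '.' := fun hh => hu (by simp [hh])
    have h2 := ih (fun hh => hu (List.mem_cons_of_mem _ hh))
    simp only [List.cons_append, mySplit, ha, if_false, h2]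

lemma mySplit_peel {r : List Char} (h : '.' ∈ r) :
    ∃ u r', r = u ++ '.' :: r' ∧ '.' ∉ u ∧ mySplit r = u :: mySplit r' := by
  induction r with
  | nil => simp at h
  | cons c cs ih =>
    by_cases hc : c = '.'
    · subst hc
      exact ⟨[], cs, by simp, by simp, by simp [mySplit]⟩
    · have hcs : '.' ∈ cs := by
        rcases List.mem_cons.1 h with h' | h'
        · exact absurd h'.symm hc
        · exact h'
      obtain ⟨u, r', hr, hu, hs⟩ := ih hcs
      refine ⟨c :: u, r', by simp [hr], ?_, ?_⟩
      · intro hh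
        rcases List.mem_cons.1 hh with h' | h'
        · exact hc h'.symm
        · exact hu h'
      · simp only [mySplit, hc, if_false, hs]

lemma isIn_dot_iff (r : List Char) : PySem.Chars.isIn ['.'] r = true ↔ '.' ∈ r := by
  rw [PySem.Chars.isIn_iff_infix]
  constructor
  · intro h; exact h.mem (by simp)
  · intro h
    obtain ⟨s, t, hst⟩ := List.append_of_mem h
    exact ⟨s, t, by simp [hst]⟩

-- prefix tests through a leading dot-free component
lemma prefix_comp_iff (u : List Char) : ∀ (v w p' : List Char), '.' ∉ u → '.' ∉ v →
    ((u ++ '.' :: w) <+: (v ++ '.' :: p') ↔ u = v ∧ w <+: p') := by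
  induction u with
  | nil =>
    intro v w p' _ hv
    cases v with
    | nil => simp [List.cons_prefix_cons]
    | cons c v' =>
      have hc : ('.' : Char) ≠ c := fun hh => hv (by simp [← hh])
      simp [List.cons_prefix_cons, hc]
  | cons a u' ih =>
    intro v w p' hu hv
    have ha : a ≠ '.' := fun hh => hu (by simp [hh])
    cases v with
    | nil => simp [List.cons_prefix_cons, ha]
    | cons c v' =>
      have hu' : '.' ∉ u' := fun hh => hu (List.mem_cons_of_mem _ hh)
      have hv' : '.' ∉ v' := fun hh => hv (List.mem_cons_of_mem _ hh)
      simp [List.cons_prefix_cons, ih v' w p' hu' hv', and_assoc]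

lemma not_prefix_dotfree (u w : List Char) : ∀ (p : List Char), '.' ∉ p →
    ¬ (u ++ '.' :: w) <+: p := by
  induction u with
  | nil =>
    intro p hp hpre
    cases p with
    | nil => simp at hpre
    | cons c ps =>
      rw [List.nil_append, List.cons_prefix_cons] at hpre
      exact hp (by simp [← hpre.1])
  | cons a u' ih =>
    intro p hp hpre
    cases p with
    | nil => simp at hpre
    | cons c ps =>
      rw [List.cons_append, List.cons_prefix_cons] at hpre
      exact ih ps (fun hh => hp (List.mem_cons_of_mem _ hh)) hpre.2

lemma infix_iff_exists_drop (sub s : List Char) : sub <:+: s ↔ ∃ n, sub <+: s.drop n := by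
  constructor
  · intro h
    obtain ⟨t, hpre, hsuf⟩ := List.infix_iff_prefix_suffix.1 h
    exact ⟨s.length - t.length, by rwa [← List.suffix_iff_eq_drop.1 hsuf]⟩
  · rintro ⟨n, h⟩
    exact List.infix_iff_prefix_suffix.2 ⟨s.drop n, h, List.drop_suffix n s⟩

-- first-occurrence characterisation of find (glue around PySem.Chars.find_spec)
lemma find_eq_of (s sub : List Char) (k : Nat)
    (h1 : sub <+: s.drop k) (h2 : ∀ i < k, ¬ sub <+: s.drop i) :
    PySem.Chars.find s sub = (k : Int) := by
  have hinf : sub <:+: s := (infix_iff_exists_drop sub s).2 ⟨k, h1⟩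
  have hnn : 0 ≤ PySem.Chars.find s sub := (PySem.Chars.find_nonneg_iff s sub).2 hinf
  obtain ⟨hocc, hmin⟩ := PySem.Chars.find_spec hnn
  have hk : (PySem.Chars.find s sub).toNat = k := by
    rcases lt_trichotomy (PySem.Chars.find s sub).toNat k with h | h | h
    · exact absurd hocc (h2 _ h)
    · exact h
    · exact absurd h1 (hmin k h)
  omega

lemma drop_len_add {α : Type} (l₁ : List α) : ∀ (l₂ : List α) (n : Nat),
    (l₁ ++ l₂).drop (l₁.length + n) = l₂.drop n := by
  induction l₁ with
  | nil => simp
  | cons a l₁ ih => intro l₂ n; simpa [Nat.succ_add] using ih l₂ n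

lemma no_dot_prefix_in_comp (u z t : List Char) (hu : '.' ∉ u) :
    ∀ i < u.length, ¬ ('.' :: t) <+: ((u ++ z).drop i) := by
  intro i hi hpre
  rw [List.drop_append_of_le_length (le_of_lt hi)] at hpre
  have hne : u.drop i ≠ [] := by
    simp only [ne_eq, List.drop_eq_nil_iff, not_le]; omega
  obtain ⟨c, cs, hcs⟩ := List.exists_cons_of_ne_nil hne
  rw [hcs, List.cons_append, List.cons_prefix_cons] at hpre
  have hcm : c ∈ u := List.drop_subset i u (hcs ▸ List.mem_cons_self ..)
  exact hu (hpre.1 ▸ hcm)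

lemma slice_neg_one {α : Type} (xs : List α) :
    PySem.List.slice xs none (some (-1)) = xs.dropLast := by
  simp only [PySem.List.slice, PySem.List.clampIdx]
  cases xs with
  | nil => simp
  | cons a l =>
    have h1 : ¬ (((a :: l).length : Int) + (-1) < 0) := by
      simp only [List.length_cons, not_lt]
      omega
    norm_num [h1]
    rw [List.dropLast_eq_take]
    congr 1
    all_goals omega

lemma suffix_dotstar (u r' : List Char) :
    (['.','*'] <:+ (u ++ '.' :: r')) ↔ (r' = ['*'] ∨ ['.','*'] <:+ r') := by
  have key : ∀ (z : List Char), (['.','*'] <:+ z) ↔ ['*','.'] <+: z.reverse := by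
    intro z
    constructor
    · intro h
      have h2 := List.reverse_prefix.2 h
      simpa using h2
    · intro h
      have h2 : (['.','*'] : List Char).reverse <+: z.reverse := by simpa using h
      exact List.reverse_prefix.1 h2
  rw [key, key]
  have hxrev : (u ++ '.' :: r').reverse = (r'.reverse ++ ['.']) ++ u.reverse := by simp
  rw [hxrev]
  cases hrev : r'.reverse with
  | nil =>
    have h0 : r' = [] := by simpa using congrArg List.reverse hrev
    subst h0
    simp [List.cons_prefix_cons]
  | cons c cs =>
    have hr' : r' = cs.reverse ++ [c] := by
      have h2 := congrArg List.reverse hrev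
      simpa using h2
    cases cs with
    | nil =>
      simp only [List.reverse_nil, List.nil_append] at hr'
      subst hr'
      simp only [List.cons_append, List.nil_append, List.cons_prefix_cons, List.prefix_cons_iff]
      simp [List.cons_prefix_cons]
      exact eq_comm
    | cons d cs' =>
      have hne : r' ≠ ['*'] := by
        rw [hr']
        intro hh
        apply_fun List.length at hh
        simp at hh
      simp only [List.cons_append, List.append_assoc, List.cons_prefix_cons, hne, false_or]
      constructor
      · rintro ⟨hc, hd, _⟩
        exact ⟨hc, hd, List.nil_prefix⟩
      · rintro ⟨hc, hd, _⟩
        exact ⟨hc, hd, List.nil_prefix⟩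

lemma decide_and' (P Q : Prop) [Decidable P] [Decidable Q] :
    decide (P ∧ Q) = (decide P && decide Q) := by
  by_cases hP : P <;> by_cases hQ : Q <;> simp [hP, hQ]

lemma capAv_cons (v u : List Char) (ps rs : List (List Char)) (hu : u ≠ ['*']) :
    capAv (v :: ps) (u :: rs) = (decide (v = u) && capAv ps rs) := by
  unfold capAv
  rw [PySem.List.index?_cons_of_ne rs hu]
  cases hidx : PySem.List.index? rs ['*'] with
  | some j =>
    simp only [Option.map_some]
    simp only [List.take_succ_cons, List.cons.injEq, decide_and']
  | none =>
    simp only [Option.map_none, List.length_cons]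
    simp only [List.take_succ_cons, List.cons.injEq, decide_and']

lemma capAv_star (ps rs : List (List Char)) : capAv ps (['*'] :: rs) = true := by
  unfold capAv
  rw [PySem.List.index?_cons_self]
  simp

-- the master equivalence of the two hierarchical checks
lemma capAv_eq_capBv_aux (n : Nat) : ∀ (r p : List Char), r.length ≤ n → '.' ∈ r →
    (mySplit r).length ≤ (mySplit p).length → p ≠ r →
    capAv (mySplit p) (mySplit r) = capBv p r := by
  induction n with
  | zero =>
    intro r p hn hdot
    have : r = [] := by cases r <;> simp_all
    subst this
    simp at hdot
  | succ n ih =>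
    intro r p hn hdot hlen hne
    obtain ⟨u, r', hr, hu, hsr⟩ := mySplit_peel hdot
    have hpdot : '.' ∈ p := by
      by_contra hnp
      rw [mySplit_of_not_mem hnp, hsr] at hlen
      simp only [List.length_cons, List.length_nil] at hlen
      have h0 : (mySplit r').length ≠ 0 :=
        fun hh => mySplit_ne_nil r' (List.length_eq_zero_iff.1 hh)
      omega
    obtain ⟨v, p', hp, hv, hsp⟩ := mySplit_peel hpdot
    by_cases hustar : u = ['*']
    · -- required starts with the wildcard component: both sides are true
      have hsw : PySem.Chars.startswith r ['*', '.'] = true := by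
        rw [PySem.Chars.startswith_iff, hr, hustar]
        exact ⟨r', rfl⟩
      rw [hsr, hustar, capAv_star]
      simp [capBv, hsw]
    · have hsw : PySem.Chars.startswith r ['*', '.'] = false := by
        rw [Bool.eq_false_iff]
        intro hh
        rw [PySem.Chars.startswith_iff, hr] at hh
        have h2 : (['*'] ++ '.' :: []) <+: (u ++ '.' :: r') := by simpa using hh
        rw [prefix_comp_iff ['*'] u [] r' (by simp) hu] at h2
        exact hustar h2.1.symm
      -- both sides factor through the first components
      have hAstep : capAv (mySplit p) (mySplit r)
          = (decide (v = u) && capAv (mySplit p') (mySplit r')) := by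
        rw [hsr, hsp, capAv_cons v u _ _ hustar]
      have hne' : v = u → p' ≠ r' := by
        intro hvu hpr
        exact hne (by rw [hp, hr, hvu, hpr])
      have hlen' : (mySplit r').length ≤ (mySplit p').length := by
        rw [hsr, hsp] at hlen
        simpa using hlen
      have hn' : r'.length ≤ n := by
        rw [hr] at hn
        simp only [List.length_append, List.length_cons] at hn
        omega
      -- startswith p (u ++ '.' :: X) factors as (v = u) && startswith p' X
      have hfact : ∀ X : List Char,
          PySem.Chars.startswith p (u ++ '.' :: X) = ((decide (v = u)) && PySem.Chars.startswith p' X) := by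
        intro X
        by_cases hvu : v = u
        · subst hvu
          cases hsx : PySem.Chars.startswith p' X with
          | true =>
            have hx := (PySem.Chars.startswith_iff p' X).1 hsx
            have : PySem.Chars.startswith p (v ++ '.' :: X) = true := by
              rw [PySem.Chars.startswith_iff, hp]
              exact (prefix_comp_iff v v X p' hv hv).2 ⟨rfl, hx⟩
            simp [this]
          | false =>
            have : PySem.Chars.startswith p (v ++ '.' :: X) = false := by
              rw [Bool.eq_false_iff]
              intro hh
              rw [PySem.Chars.startswith_iff, hp] at hh
              have h2 := ((prefix_comp_iff v v X p' hv hv).1 hh).2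
              rw [← PySem.Chars.startswith_iff] at h2
              simp [hsx] at h2
            simp [this, hsx]
        · have hvu' : u ≠ v := fun hh => hvu hh.symm
          have : PySem.Chars.startswith p (u ++ '.' :: X) = false := by
            rw [Bool.eq_false_iff]
            intro hh
            rw [PySem.Chars.startswith_iff, hp] at hh
            exact hvu' ((prefix_comp_iff u v X p' hu hv).1 hh).1
          simp [this, hvu]
      by_cases hS1 : (['*', '.'] : List Char) <+: r'
      · -- the first wildcard component is the second one: find ".*." = len(u)
        have hfind : PySem.Chars.find r ['.', '*', '.'] = (u.length : Int) := by
          apply find_eq_of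
          · rw [hr]
            have hdl : (u ++ '.' :: r').drop u.length = '.' :: r' := List.drop_left
            rw [hdl, List.cons_prefix_cons]
            exact ⟨rfl, hS1⟩
          · intro i hi
            rw [hr]
            exact no_dot_prefix_in_comp u ('.' :: r') _ hu i hi
        have htake : PySem.List.slice r none (some ((u.length : Int) + 1)) = u ++ ['.'] := by
          have hcast : ((u.length : Int) + 1) = ((u.length + 1 : Nat) : Int) := by push_cast; ring
          rw [hcast, PySem.List.slice_to_natCast, hr, List.take_append]
          simp
        have hBval : capBv p r = PySem.Chars.startswith p (u ++ ['.']) := by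
          unfold capBv
          rw [hsw, if_neg (by simp), hfind, if_pos (by omega : ((u.length : Nat) : Int) ≠ -1), htake]
        -- A side: the second component of r is "*"
        obtain ⟨tl, htl⟩ := hS1
        have hr2 : r' = ['*'] ++ '.' :: tl := by
          rw [← htl]; rfl
        have hsr2 : mySplit r' = ['*'] :: mySplit tl := by
          rw [hr2]; exact mySplit_append ['*'] tl (by simp)
        rw [hAstep, hsr2, capAv_star, hBval, Bool.and_true]
        have h3 := hfact []
        have h4 : PySem.Chars.startswith p' [] = true := by
          rw [PySem.Chars.startswith_iff]; exact List.nil_prefix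
        rw [h4, Bool.and_true] at h3
        exact h3.symm
      · by_cases hS2 : (['.', '*', '.'] : List Char) <:+: r'
        · -- wildcard strictly inside r': recurse
          have hnn' : 0 ≤ PySem.Chars.find r' ['.', '*', '.'] :=
            (PySem.Chars.find_nonneg_iff r' _).2 hS2
          obtain ⟨hocc', hmin'⟩ := PySem.Chars.find_spec hnn'
          set k' := (PySem.Chars.find r' ['.', '*', '.']).toNat with hk'
          have hfind : PySem.Chars.find r ['.', '*', '.'] = ((u.length + 1 + k' : Nat) : Int) := by
            apply find_eq_of
            · rw [hr]
              have : (u ++ '.' :: r').drop (u.length + (1 + k')) = ('.' :: r').drop (1 + k') :=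
                drop_len_add u ('.' :: r') (1 + k')
              rw [show u.length + 1 + k' = u.length + (1 + k') by omega, this,
                show 1 + k' = k' + 1 by omega, List.drop_succ_cons]
              exact hocc'
            · intro i hi
              rw [hr]
              rcases Nat.lt_or_ge i u.length with h | h
              · exact no_dot_prefix_in_comp u ('.' :: r') _ hu i h
              · rcases Nat.eq_or_lt_of_le h with h' | h'
                · have hdl : (u ++ '.' :: r').drop i = '.' :: r' := by
                    rw [← h']; exact List.drop_left
                  rw [hdl, List.cons_prefix_cons]
                  rintro ⟨_, hh⟩
                  exact hS1 hh
                · intro hh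
                  have hm : i - u.length - 1 < k' := by omega
                  have hdd : (u ++ '.' :: r').drop i = r'.drop (i - u.length - 1) := by
                    have h2 : i = u.length + (1 + (i - u.length - 1)) := by omega
                    conv_lhs => rw [h2]
                    rw [drop_len_add u ('.' :: r') (1 + (i - u.length - 1)),
                      show 1 + (i - u.length - 1) = (i - u.length - 1) + 1 by omega,
                      List.drop_succ_cons]
                  rw [hdd] at hh
                  exact hmin' _ hm hh
          have htake : PySem.List.slice r none (some (((u.length + 1 + k' : Nat) : Int) + 1)) =
              u ++ '.' :: r'.take (k' + 1) := by
            have hcast : (((u.length + 1 + k' : Nat) : Int) + 1) = ((u.length + 1 + k' + 1 : Nat) : Int) := by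
              push_cast; ring
            rw [hcast, PySem.List.slice_to_natCast, hr, List.take_append]
            have h2 : u.length + 1 + k' + 1 - u.length = k' + 2 := by omega
            rw [List.take_of_length_le (by omega), h2]
            simp [List.take_succ_cons]
          have hBval : capBv p r = PySem.Chars.startswith p (u ++ '.' :: r'.take (k' + 1)) := by
            unfold capBv
            rw [hsw, if_neg (by simp), hfind,
              if_pos (by omega : ((u.length + 1 + k' : Nat) : Int) ≠ -1), htake]
          have hdotr' : '.' ∈ r' := hS2.mem (by simp)
          have hBval' : capBv p' r' = PySem.Chars.startswith p' (r'.take (k' + 1)) := by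
            unfold capBv
            have hsw' : PySem.Chars.startswith r' ['*', '.'] = false := by
              rw [Bool.eq_false_iff]
              intro hh
              exact hS1 ((PySem.Chars.startswith_iff r' _).1 hh)
            have hfind' : PySem.Chars.find r' ['.', '*', '.'] = ((k' : Nat) : Int) := by
              rw [hk']; exact (Int.toNat_of_nonneg hnn').symm
            have htake' : PySem.List.slice r' none (some (((k' : Nat) : Int) + 1)) = r'.take (k' + 1) := by
              have hcast : (((k' : Nat) : Int) + 1) = ((k' + 1 : Nat) : Int) := by push_cast; ring
              rw [hcast, PySem.List.slice_to_natCast]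
            rw [hsw', if_neg (by simp), hfind',
              if_pos (by omega : ((k' : Nat) : Int) ≠ -1), htake']
          rw [hAstep, hBval, hfact]
          by_cases hvu : v = u
          · rw [ih r' p' hn' hdotr' hlen' (hne' hvu), hBval']
          · simp [hvu]
        · -- no internal wildcard: find ".*." = -1 on r
          have hfind : PySem.Chars.find r ['.', '*', '.'] = -1 := by
            rw [PySem.Chars.find_eq_neg_one_iff]
            intro hh
            obtain ⟨i, hi⟩ := (infix_iff_exists_drop _ _).1 hh
            rw [hr] at hi
            rcases Nat.lt_or_ge i u.length with h | h
            · exact no_dot_prefix_in_comp u ('.' :: r') _ hu i h hi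
            · rcases Nat.eq_or_lt_of_le h with h' | h'
              · subst h'
                rw [List.drop_left, List.cons_prefix_cons] at hi
                exact hS1 hi.2
              · have hdd : (u ++ '.' :: r').drop i = r'.drop (i - u.length - 1) := by
                  have h2 : i = u.length + (1 + (i - u.length - 1)) := by omega
                  conv_lhs => rw [h2]
                  rw [drop_len_add u ('.' :: r') (1 + (i - u.length - 1)),
                    show 1 + (i - u.length - 1) = (i - u.length - 1) + 1 by omega,
                    List.drop_succ_cons]
                rw [hdd] at hi
                exact hS2 ((infix_iff_exists_drop _ _).2 ⟨_, hi⟩)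
          by_cases hend : PySem.Chars.endswith r ['.', '*'] = true
          · -- trailing wildcard
            have hsuf := (PySem.Chars.endswith_iff r _).1 hend
            rw [hr] at hsuf
            rcases (suffix_dotstar u r').1 hsuf with hstar | hsuf'
            · -- r' = "*": B compares against u ++ "."
              subst hstar
              have hdrop : PySem.List.slice r none (some (-1)) = u ++ ['.'] := by
                rw [slice_neg_one, hr]
                rw [show u ++ '.' :: ['*'] = (u ++ ['.']) ++ ['*'] by simp]
                exact List.dropLast_concat
              have hBval : capBv p r = PySem.Chars.startswith p (u ++ ['.']) := by
                unfold capBv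
                rw [hsw, if_neg (by simp), hfind, if_neg (by simp), if_pos hend, hdrop]
              have hsr2 : mySplit ['*'] = [['*']] := mySplit_of_not_mem (by simp)
              rw [hAstep, hBval, hsr2, capAv_star, Bool.and_true]
              have h3 := hfact []
              have h4 : PySem.Chars.startswith p' [] = true := by
                rw [PySem.Chars.startswith_iff]; exact List.nil_prefix
              rw [h4, Bool.and_true] at h3
              exact h3.symm
            · -- wildcard is the last component of r', recurse
              have hr'ne : r' ≠ [] := by
                intro hh
                rw [hh] at hsuf'
                exact absurd hsuf'.length_le (by simp)
              obtain ⟨x, xs, hx⟩ := List.exists_cons_of_ne_nil hr'ne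
              have hdropl : PySem.List.slice r none (some (-1)) = u ++ '.' :: r'.dropLast := by
                rw [slice_neg_one, hr, List.dropLast_append_cons]
                congr 1
                rw [hx]
                cases xs with
                | nil =>
                  exfalso
                  rw [hx] at hsuf'
                  exact absurd hsuf'.length_le (by simp)
                | cons y ys => simp [List.dropLast_cons₂]
              have hBval : capBv p r = PySem.Chars.startswith p (u ++ '.' :: r'.dropLast) := by
                unfold capBv
                rw [hsw, if_neg (by simp), hfind, if_neg (by simp), if_pos hend, hdropl]
              have hdotr' : '.' ∈ r' := hsuf'.isInfix.mem (by simp)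
              have hBval' : capBv p' r' = PySem.Chars.startswith p' r'.dropLast := by
                unfold capBv
                have hsw' : PySem.Chars.startswith r' ['*', '.'] = false := by
                  rw [Bool.eq_false_iff]
                  intro hh
                  exact hS1 ((PySem.Chars.startswith_iff r' _).1 hh)
                have hfind' : PySem.Chars.find r' ['.', '*', '.'] = -1 := by
                  rw [PySem.Chars.find_eq_neg_one_iff]
                  exact hS2
                have hend' : PySem.Chars.endswith r' ['.', '*'] = true :=
                  (PySem.Chars.endswith_iff r' _).2 hsuf'
                rw [hsw', if_neg (by simp), hfind', if_neg (by simp), if_pos hend', slice_neg_one]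
              rw [hAstep, hBval, hfact]
              by_cases hvu : v = u
              · rw [ih r' p' hn' hdotr' hlen' (hne' hvu), hBval']
              · simp [hvu]
          · -- no wildcard at all in r
            have hnsuf : ¬ (['.','*'] : List Char) <:+ (u ++ '.' :: r') := by
              intro hh
              exact hend ((PySem.Chars.endswith_iff r _).2 (hr ▸ hh))
            have hr'nstar : r' ≠ ['*'] := by
              intro hh
              exact hnsuf ((suffix_dotstar u r').2 (Or.inl hh))
            have hr'nsuf : ¬ (['.','*'] : List Char) <:+ r' := by
              intro hh
              exact hnsuf ((suffix_dotstar u r').2 (Or.inr hh))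
            have hBval : capBv p r = PySem.Chars.startswith p (u ++ '.' :: (r' ++ ['.'])) := by
              unfold capBv
              have hend' : PySem.Chars.endswith r ['.', '*'] = false := by
                rw [Bool.eq_false_iff]
                intro hh
                exact hnsuf (hr ▸ (PySem.Chars.endswith_iff r _).1 hh)
              rw [hsw, if_neg (by simp), hfind, if_neg (by simp), hend', if_neg (by simp), hr]
              simp
            rw [hAstep, hBval, hfact]
            by_cases hvu : v = u
            · simp only [hvu, decide_true, Bool.true_and]
              by_cases hdotr' : '.' ∈ r'
              · -- recurse
                have hBval' : capBv p' r' = PySem.Chars.startswith p' (r' ++ ['.']) := by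
                  unfold capBv
                  have hsw' : PySem.Chars.startswith r' ['*', '.'] = false := by
                    rw [Bool.eq_false_iff]
                    intro hh
                    exact hS1 ((PySem.Chars.startswith_iff r' _).1 hh)
                  have hfind' : PySem.Chars.find r' ['.', '*', '.'] = -1 := by
                    rw [PySem.Chars.find_eq_neg_one_iff]
                    exact hS2
                  have hend' : PySem.Chars.endswith r' ['.', '*'] = false := by
                    rw [Bool.eq_false_iff]
                    intro hh
                    exact hr'nsuf ((PySem.Chars.endswith_iff r' _).1 hh)
                  rw [hsw', if_neg (by simp), hfind', if_neg (by simp), hend', if_neg (by simp)]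
                rw [ih r' p' hn' hdotr' hlen' (hne' hvu), hBval']
              · -- base case: r' is the last, wildcard-free component
                rw [mySplit_of_not_mem hdotr']
                have hidx : PySem.List.index? ([r'] : List (List Char)) ['*'] = none := by
                  rw [PySem.List.index?_cons_of_ne [] hr'nstar]
                  simp [PySem.List.index?]
                unfold capAv
                rw [hidx]
                by_cases hdotp' : '.' ∈ p'
                · obtain ⟨w, p'', hpw, hw, hsw2⟩ := mySplit_peel hdotp'
                  rw [hsw2]
                  simp only [List.length_singleton, List.take_succ_cons, List.take_zero]
                  have hiff : (w = r') ↔ ((r' ++ '.' :: []) <+: p') := by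
                    rw [hpw, prefix_comp_iff r' w [] p'' hdotr' hw]
                    constructor
                    · intro h; exact ⟨h.symm, List.nil_prefix⟩
                    · intro h; exact h.1.symm
                  by_cases hwr : w = r'
                  · have hsp2 : PySem.Chars.startswith p' (r' ++ ['.']) = true := by
                      rw [PySem.Chars.startswith_iff]
                      simpa using hiff.1 hwr
                    simp [hwr, hsp2]
                  · have hsp2 : PySem.Chars.startswith p' (r' ++ ['.']) = false := by
                      rw [Bool.eq_false_iff]
                      intro hh
                      rw [PySem.Chars.startswith_iff] at hh
                      exact hwr (hiff.2 (by simpa using hh))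
                    simp [hwr, hsp2]
                · rw [mySplit_of_not_mem hdotp']
                  have hne2 : p' ≠ r' := hne' hvu
                  have hsp2 : PySem.Chars.startswith p' (r' ++ ['.']) = false := by
                    rw [Bool.eq_false_iff]
                    intro hh
                    rw [PySem.Chars.startswith_iff] at hh
                    exact not_prefix_dotfree r' [] p' hdotp' (by simpa using hh)
                  simp [hsp2, hne2]
            · simp [hvu]

-- A's loop in structural form
def capLoop2 : List String → List String → Bool
  | _, [] => true
  | pp, r :: rs =>
    if r = "*" then true
    else
      match pp with
      | [] => false
      | p :: ps => if p = r then capLoop2 ps rs else false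

lemma capMatchLoopA_eq_capLoop2 (rp : List String) :
    ∀ (pp : List String) (s : Nat),
      capMatchLoopA pp (PySem.List.enumerate rp (s : Int)) = capLoop2 (pp.drop s) rp := by
  induction rp with
  | nil => intro pp s; simp [PySem.List.enumerate_nil, capMatchLoopA, capLoop2]
  | cons r rs ih =>
    intro pp s
    rw [PySem.List.enumerate_cons]
    by_cases hw : r = "*"
    · subst hw
      rw [capMatchLoopA]
      rw [capLoop2.eq_def]
      simp
    · by_cases hs : s < pp.length
      · have hget : PySem.List.pyGet? pp (s : Int) = some (pp[s]) := by
          rw [PySem.List.pyGet?_natCast]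
          simp [List.getElem?_eq_getElem hs]
        have hdrop : pp.drop s = pp[s] :: pp.drop (s + 1) :=
          List.drop_eq_getElem_cons hs
        by_cases he : pp[s] = r
        · have hc1 : ((s : Int) + 1) = ((s + 1 : Nat) : Int) := by push_cast; ring
          rw [capMatchLoopA, hc1]
          simp only [hw, if_false, hget, he]
          have hcond : ¬ ((s : Int) ≥ (pp.length : Int) ∨ some r ≠ some r) := by
            push_neg
            constructor
            · exact_mod_cast hs
            · rfl
          simp only [hcond, if_false, ite_false]
          rw [ih pp (s + 1), hdrop, capLoop2]
          simp [hw, he]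
        · rw [capMatchLoopA]
          have hcond : ((s : Int) ≥ (pp.length : Int) ∨ PySem.List.pyGet? pp (s : Int) ≠ some r) := by
            right; rw [hget]; simp [he]
          simp only [hw, if_false, hcond, if_true, ite_true]
          rw [hdrop, capLoop2]
          simp [hw, he]
      · have hge : pp.length ≤ s := Nat.le_of_not_lt hs
        have hget : PySem.List.pyGet? pp (s : Int) = none := by
          rw [PySem.List.pyGet?_natCast]
          simp [List.getElem?_eq_none hge]
        rw [capMatchLoopA]
        have hcond : ((s : Int) ≥ (pp.length : Int) ∨ PySem.List.pyGet? pp (s : Int) ≠ some r) := by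
          left; exact_mod_cast hge
        simp only [hw, if_false, hcond, if_true, ite_true]
        rw [List.drop_eq_nil_of_le hge, capLoop2]
        simp [hw]

lemma ofList_eq_star_iff (u : List Char) : String.ofList u = "*" ↔ u = ['*'] := by
  constructor
  · intro h
    have := congrArg String.toList h
    simpa [String.toList_ofList] using this
  · intro h; subst h; rfl

lemma ofList_inj {a b : List Char} : String.ofList a = String.ofList b ↔ a = b := by
  constructor
  · intro h
    have := congrArg String.toList h
    simpa [String.toList_ofList] using this
  · intro h; subst h; rfl

lemma capLoop2_eq_capAv (rp : List (List Char)) :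
    ∀ (pp : List (List Char)), rp.length ≤ pp.length →
      capLoop2 (pp.map String.ofList) (rp.map String.ofList) = capAv pp rp := by
  induction rp with
  | nil =>
    intro pp _
    simp [capLoop2, capAv, PySem.List.index?]
  | cons u rs ih =>
    intro pp hlen
    cases pp with
    | nil => simp at hlen
    | cons v ps =>
      have hlen' : rs.length ≤ ps.length := by simpa using hlen
      have hstep : capLoop2 (List.map String.ofList (v :: ps)) (List.map String.ofList (u :: rs))
          = if String.ofList u = "*" then true
            else if String.ofList v = String.ofList u then
              capLoop2 (ps.map String.ofList) (rs.map String.ofList)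
            else false := rfl
      rw [hstep]
      by_cases hu : u = ['*']
      · subst hu
        rw [capAv_star]
        simp
      · have hu' : String.ofList u ≠ "*" := fun hh => hu ((ofList_eq_star_iff u).1 hh)
        rw [capAv_cons v u ps rs hu]
        simp only [hu', if_false, ite_false]
        by_cases hvu : v = u
        · subst hvu
          simp [ih ps hlen']
        · have hne2 : String.ofList v ≠ String.ofList u := fun hh => hvu (ofList_inj.1 hh)
          simp [hne2, hvu]

-- ===== VERDICT (by name: the statement is the Claim_ definition above) =====
theorem capability_matches_py_spec : Claim_equal_capability_matches_py := by
  intro provided required _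
  unfold Spec_capability_matches_py
  by_cases heq : provided = required
  · simp [capability_matches_py, capability_matches_py_alt, heq]
  · have hpne : provided.toList ≠ required.toList := fun hh => heq (String.toList_inj.1 hh)
    -- names for the two character lists
    set p := provided.toList with hpdef
    set r := required.toList with hrdef
    -- the split results of port A, char-level
    have hsplit : ∀ s : String, (PySem.Str.split? s ".").getD [] = (mySplit s.toList).map String.ofList := by
      intro s
      unfold PySem.Str.split? PySem.Chars.split?
      have hd : (".".toList : List Char) = ['.'] := rfl
      rw [hd]
      simp [splitOn_eq_mySplit]
    have hisin : PySem.Str.isIn "." required = PySem.Chars.isIn ['.'] r := by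
      unfold PySem.Str.isIn
      rfl
    have hadm : PySem.Str.startswith required "admin." = PySem.Chars.startswith r ['a','d','m','i','n','.'] := by
      unfold PySem.Str.startswith
      rfl
    have hadmEq : (if provided = "admin" ∧ ¬ (PySem.Str.startswith required "admin.") = true then true else false)
        = (decide (provided = "admin") && !(PySem.Chars.startswith r ['a','d','m','i','n','.'])) := by
      rw [hadm]
      by_cases h1 : provided = "admin" <;>
        cases h2 : PySem.Chars.startswith r ['a','d','m','i','n','.'] <;>
          simp [h1, h2]
    by_cases hdot : PySem.Chars.isIn ['.'] r = true
    · have hdotmem : '.' ∈ r := (isIn_dot_iff r).1 hdot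
      by_cases hcnt : PySem.Chars.count p ['.'] ≥ PySem.Chars.count r ['.']
      · -- hierarchical branch on both sides
        have hlen : (mySplit r).length ≤ (mySplit p).length := by
          rw [length_mySplit, length_mySplit]
          rw [count_dot_eq, count_dot_eq] at hcnt
          omega
        have hlenS : ((mySplit r).map String.ofList).length ≤ ((mySplit p).map String.ofList).length := by
          simpa using hlen
        have hAval : capability_matches_py provided required = capAv (mySplit p) (mySplit r) := by
          unfold capability_matches_py
          simp only [heq, if_false, ite_false, hisin, hdot, if_true, hsplit, ← hpdef, ← hrdef]
          simp only [hlenS, if_true, ite_true]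
          have h0 := capMatchLoopA_eq_capLoop2 ((mySplit r).map String.ofList) ((mySplit p).map String.ofList) 0
          simp only [Nat.cast_zero, List.drop_zero] at h0
          rw [h0]
          exact capLoop2_eq_capAv (mySplit r) (mySplit p) hlen
        have hBval : capability_matches_py_alt provided required = capBv p r := by
          unfold capability_matches_py_alt
          simp only [heq, if_false, ite_false, ← hpdef, ← hrdef, hdot, decide_eq_true_eq]
          simp only [hcnt, decide_true, Bool.and_true, Bool.true_and, if_true, ite_true]
          rfl
        rw [hAval, hBval]
        exact capAv_eq_capBv_aux r.length r p (le_refl _) hdotmem hlen hpne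
      · -- length guard fails: both fall through to the admin check
        have hAval : capability_matches_py provided required
            = (decide (provided = "admin") && !(PySem.Chars.startswith r ['a','d','m','i','n','.'])) := by
          unfold capability_matches_py
          simp only [heq, if_false, ite_false, hisin, hdot, if_true, hsplit, ← hpdef, ← hrdef]
          have hlenS : ¬ ((mySplit p).map String.ofList).length ≥ ((mySplit r).map String.ofList).length := by
            rw [count_dot_eq, count_dot_eq] at hcnt
            simp only [List.length_map, length_mySplit]
            omega
          simp only [hlenS, if_false, ite_false]
          exact hadmEq
        have hBval : capability_matches_py_alt provided required
            = (decide (provided = "admin") && !(PySem.Chars.startswith r ['a','d','m','i','n','.'])) := by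
          unfold capability_matches_py_alt
          have hc : (PySem.Chars.isIn ['.'] r && decide (PySem.Chars.count p ['.'] ≥ PySem.Chars.count r ['.'])) = false := by
            simp [hcnt]
          simp only [heq, if_false, ite_false, ← hpdef, ← hrdef, hc, Bool.false_eq_true]
        rw [hAval, hBval]
    · -- no dot in required: both go to the admin check
      have hdot' : PySem.Chars.isIn ['.'] r = false := by
        cases h : PySem.Chars.isIn ['.'] r with
        | true => exact absurd h hdot
        | false => rfl
      have hAval : capability_matches_py provided required
          = (decide (provided = "admin") && !(PySem.Chars.startswith r ['a','d','m','i','n','.'])) := by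
        unfold capability_matches_py
        simp only [heq, if_false, ite_false, hisin, hdot', Bool.false_eq_true]
        exact hadmEq
      have hBval : capability_matches_py_alt provided required
          = (decide (provided = "admin") && !(PySem.Chars.startswith r ['a','d','m','i','n','.'])) := by
        unfold capability_matches_py_alt
        have hc : (PySem.Chars.isIn ['.'] r && decide (PySem.Chars.count p ['.'] ≥ PySem.Chars.count r ['.'])) = false := by
          simp [hdot']
        simp only [heq, if_false, ite_false, ← hpdef, ← hrdef, hc, Bool.false_eq_true]
      rw [hAval, hBval]
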